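-- pv_equiv track=rewrite | github.com/nalog-debug/Urban.Modul2 | module_2_hard.py | get_password
-- ===== SOURCE A (Python) =====
-- def get_password(win):
--     password = ''
--     for i in range(1, win):
--         for j in range(2, win):
--             if j <= i:
--                 continue
--             if win % (i + j) == 0:
--                 password += str(i) + str(j)
--     return password
-- ===== SOURCE B (Python) =====
-- def get_password(win):
--     # Build the divisor list of win once, then for each i emit j = s - i for
--     # every divisor s >= 2*i + 1, instead of scanning all j for each i.
--     if win < 2:
--         return ''
--     divs = [d for d in range(1, win + 1) if win % d == 0]
--     parts = []
--     for i in range(1, win):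
--         lo = 2 * i + 1
--         for s in divs:
--             if s >= lo:
--                 parts.append(str(i) + str(s - i))
--     return ''.join(parts)
-- ===== Notes on version B (the rewrite author's own statement) =====
-- stated objective: faster
-- what changed: Instead of testing divisibility of win by i+j for every pair (i,j) in a double O(win^2) scan, B precomputes the list of divisors of win once and, for each i, emits j = s - i only for the divisors s >= 2*i+1, collecting pieces in a list joined once.
import Mathlib
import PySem

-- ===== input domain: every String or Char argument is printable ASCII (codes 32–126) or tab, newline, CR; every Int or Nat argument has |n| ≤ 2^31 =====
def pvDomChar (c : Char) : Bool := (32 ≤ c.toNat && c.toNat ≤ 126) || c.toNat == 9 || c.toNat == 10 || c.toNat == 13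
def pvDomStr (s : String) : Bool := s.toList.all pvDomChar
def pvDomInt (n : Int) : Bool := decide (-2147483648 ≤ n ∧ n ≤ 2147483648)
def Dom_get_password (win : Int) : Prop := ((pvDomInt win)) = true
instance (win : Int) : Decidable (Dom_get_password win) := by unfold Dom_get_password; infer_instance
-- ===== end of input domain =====

-- B precomputes the divisor list of win once and emits j = s - i for each divisor s ≥ 2*i+1,
-- replacing A's double scan over all pairs (i, j); same return value, measured faster.

-- ===== PORT A =====
def get_password (win : Int) : String :=
  (PySem.List.pyRange 1 win 1).foldl (fun password i =>
    (PySem.List.pyRange 2 win 1).foldl (fun password j =>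
      if j ≤ i then password
      else if PySem.Int.mod win (i + j) == 0 then
        password ++ (PySem.Int.toStr i ++ PySem.Int.toStr j)
      else password) password) ""

-- ===== PORT B =====
def get_password_alt (win : Int) : String :=
  if win < 2 then "" else
  let divs := (PySem.List.pyRange 1 (win + 1) 1).filter (fun d => PySem.Int.mod win d == 0)
  let parts := (PySem.List.pyRange 1 win 1).foldl (fun parts i =>
    let lo := 2 * i + 1
    divs.foldl (fun parts s =>
      if s ≥ lo then parts ++ [PySem.Int.toStr i ++ PySem.Int.toStr (s - i)]
      else parts) parts) ([] : List String)
  PySem.Str.join "" parts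

-- ===== PRECONDITION & SPEC =====
def Spec_get_password (win : Int) (out : String) : Prop := out = get_password_alt win
instance (win : Int) (out : String) : Decidable (Spec_get_password win out) := by unfold Spec_get_password; infer_instance

-- ===== CLAIM (what is proved, stated in full; the proofs are below) =====
def Claim_equal_get_password : Prop := ∀ (win : Int), Dom_get_password win → Spec_get_password win (get_password win)

-- ===== LEMMAS AND PROOFS =====

-- the characters contributed by one accepted pair (i, j)
def pvPiece (i j : Int) : List Char := PySem.Int.toChars i ++ PySem.Int.toChars j

-- A's inner-loop filter condition on j, for fixed i
def pvCondA (win i j : Int) : Bool := !(decide (j ≤ i)) && (PySem.Int.mod win (i + j) == 0)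

lemma innerA_toList (win i : Int) : ∀ (l : List Int) (p : String),
    (l.foldl (fun password j =>
      if j ≤ i then password
      else if PySem.Int.mod win (i + j) == 0 then
        password ++ (PySem.Int.toStr i ++ PySem.Int.toStr j)
      else password) p).toList
    = p.toList ++ ((l.filter (pvCondA win i)).map (fun j => pvPiece i j)).flatten := by
  intro l
  induction l with
  | nil => intro p; simp
  | cons a l ih =>
    intro p
    rw [List.foldl_cons, ih]
    by_cases h1 : a ≤ i
    · simp [pvCondA, h1]
    · by_cases h2 : PySem.Int.mod win (i + a) = 0
      · simp [pvCondA, h1, h2, pvPiece]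
      · simp [pvCondA, h1, h2]

lemma outerA_toList (win : Int) : ∀ (l : List Int) (p : String),
    (l.foldl (fun password i =>
      (PySem.List.pyRange 2 win 1).foldl (fun password j =>
        if j ≤ i then password
        else if PySem.Int.mod win (i + j) == 0 then
          password ++ (PySem.Int.toStr i ++ PySem.Int.toStr j)
        else password) password) p).toList
    = p.toList ++ (l.map (fun i =>
        (((PySem.List.pyRange 2 win 1).filter (pvCondA win i)).map (fun j => pvPiece i j)).flatten)).flatten := by
  intro l
  induction l with
  | nil => intro p; simp
  | cons a l ih =>
    intro p
    simp only [List.foldl_cons, List.map_cons, List.flatten_cons]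
    rw [ih]
    rw [innerA_toList]
    simp

lemma join_empty_toList (parts : List String) :
    (PySem.Str.join "" parts).toList = (parts.map String.toList).flatten := by
  simp only [PySem.Str.toList_join]
  have h : ∀ (l : List (List Char)), List.intercalate [] l = l.flatten := by
    intro l
    induction l with
    | nil => simp [List.intercalate]
    | cons a t ih =>
      cases t with
      | nil => simp [List.intercalate]
      | cons b t' =>
        simp only [List.intercalate, List.intersperse] at *
        simp [ih]
  simpa using h (parts.map String.toList)

lemma outerB_toList (divs : List Int) : ∀ (l : List Int) (acc : List String),
    (l.foldl (fun parts i =>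
      let lo := 2 * i + 1
      divs.foldl (fun parts s =>
        if s ≥ lo then parts ++ [PySem.Int.toStr i ++ PySem.Int.toStr (s - i)]
        else parts) parts) acc)
    = acc ++ (l.map (fun i =>
        ((divs.filter (fun s => decide (2 * i + 1 ≤ s))).map (fun s => PySem.Int.toStr i ++ PySem.Int.toStr (s - i))))).flatten := by
  intro l
  induction l with
  | nil => intro acc; simp
  | cons a l ih =>
    intro acc
    rw [List.foldl_cons, ih]
    simp only [List.map_cons, List.flatten_cons]
    rw [PySem.List.foldl_append_ite (fun s => 2 * a + 1 ≤ s) (fun s => PySem.Int.toStr a ++ PySem.Int.toStr (s - a))]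
    simp [List.append_assoc]

-- map by (i + ·) turns pyRange 2 win into pyRange (i+2) (i+win)
lemma map_add_pyRange (i a b : Int) :
    (PySem.List.pyRange a b 1).map (fun j => i + j) = PySem.List.pyRange (i + a) (i + b) 1 := by
  rw [PySem.List.pyRange_one, PySem.List.pyRange_one]
  rw [List.map_map]
  have : (i + b - (i + a)) = b - a := by ring
  rw [this]
  apply List.map_congr_left
  intro k _
  simp; ring

lemma map_filter_shift (i : Int) (p : Int → Bool) : ∀ (l : List Int),
    (l.filter p).map (fun j => i + j) = (l.map (fun j => i + j)).filter (fun s => p (s - i)) := by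
  intro l
  induction l with
  | nil => rfl
  | cons a l ih =>
    simp only [List.map_cons, List.filter_cons, add_sub_cancel_left]
    by_cases h : p a
    · simp [h, ih]
    · simp [h, ih]

lemma filter_pyRange_left (P : Int → Bool) (a a' b : Int) (h1 : a ≤ a') (h2 : a' ≤ b)
    (hP : ∀ s, P s = true → a' ≤ s) :
    (PySem.List.pyRange a b 1).filter P = (PySem.List.pyRange a' b 1).filter P := by
  rw [PySem.List.pyRange_one_append a a' b h1 h2, List.filter_append]
  have : (PySem.List.pyRange a a' 1).filter P = [] := by
    rw [List.filter_eq_nil_iff]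
    intro s hs
    rw [PySem.List.mem_pyRange_one] at hs
    intro hPs
    have := hP s hPs
    omega
  simp [this]

lemma filter_pyRange_right (P : Int → Bool) (a b b' : Int) (h1 : a ≤ b) (h2 : b ≤ b')
    (hP : ∀ s, P s = true → s < b) :
    (PySem.List.pyRange a b 1).filter P = (PySem.List.pyRange a b' 1).filter P := by
  rw [PySem.List.pyRange_one_append a b b' h1 h2, List.filter_append]
  have : (PySem.List.pyRange b b' 1).filter P = [] := by
    rw [List.filter_eq_nil_iff]
    intro s hs
    rw [PySem.List.mem_pyRange_one] at hs
    intro hPs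
    have := hP s hPs
    omega
  simp [this]

-- the core per-i identity: A's accepted j's, shifted to s = i + j, are exactly B's selected divisors
lemma core_ints (win i : Int) (hwin : 2 ≤ win) (hi1 : 1 ≤ i) (hi2 : i < win) :
    ((PySem.List.pyRange 2 win 1).filter (pvCondA win i)).map (fun j => i + j)
    = ((PySem.List.pyRange 1 (win + 1) 1).filter (fun d => PySem.Int.mod win d == 0)).filter
        (fun s => decide (2 * i + 1 ≤ s)) := by
  rw [map_filter_shift, map_add_pyRange]
  have hpred : ∀ s : Int, (pvCondA win i (s - i)) = (decide (2 * i + 1 ≤ s) && (PySem.Int.mod win s == 0)) := by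
    intro s
    unfold pvCondA
    have h : i + (s - i) = s := by ring
    rw [h]
    by_cases h1 : 2 * i + 1 ≤ s
    · have h2 : ¬ (s - i ≤ i) := by omega
      simp [h1, h2]
    · have h2 : s - i ≤ i := by omega
      simp [h1, h2]
  have hdiv : ∀ s : Int, (decide (2 * i + 1 ≤ s) && (PySem.Int.mod win s == 0)) = true → 2 * i + 1 ≤ s ∧ s ≤ win := by
    intro s hs
    rw [Bool.and_eq_true, beq_iff_eq, decide_eq_true_eq] at hs
    refine ⟨hs.1, ?_⟩
    have hdvd : s ∣ win := (PySem.Int.mod_eq_zero_iff_dvd win s).mp hs.2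
    exact Int.le_of_dvd (by omega) hdvd
  calc (PySem.List.pyRange (i + 2) (i + win) 1).filter (fun s => pvCondA win i (s - i))
      = (PySem.List.pyRange (i + 2) (i + win) 1).filter
          (fun s => decide (2 * i + 1 ≤ s) && (PySem.Int.mod win s == 0)) := by
        apply List.filter_congr; intro s _; exact hpred s
    _ = (PySem.List.pyRange 1 (win + 1) 1).filter
          (fun s => decide (2 * i + 1 ≤ s) && (PySem.Int.mod win s == 0)) := by
        rw [← filter_pyRange_right _ (i + 2) (win + 1) (i + win) (by omega) (by omega)
              (fun s hs => by have := hdiv s hs; omega)]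
        rw [← filter_pyRange_left _ 1 (i + 2) (win + 1) (by omega) (by omega)
              (fun s hs => (hdiv s hs).1.trans' (by omega))]
    _ = ((PySem.List.pyRange 1 (win + 1) 1).filter (fun d => PySem.Int.mod win d == 0)).filter
          (fun s => decide (2 * i + 1 ≤ s)) := by
        rw [List.filter_filter]

lemma core_strings (win i : Int) (hwin : 2 ≤ win) (hi1 : 1 ≤ i) (hi2 : i < win) :
    ((PySem.List.pyRange 2 win 1).filter (pvCondA win i)).map (fun j => pvPiece i j)
    = ((((PySem.List.pyRange 1 (win + 1) 1).filter (fun d => PySem.Int.mod win d == 0)).filter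
        (fun s => decide (2 * i + 1 ≤ s))).map (fun s => pvPiece i (s - i))) := by
  rw [← core_ints win i hwin hi1 hi2]
  rw [List.map_map]
  apply List.map_congr_left
  intro j _
  simp [pvPiece]

-- ===== VERDICT (by name: the statement is the Claim_ definition above) =====
theorem get_password_spec : Claim_equal_get_password := by
  intro win _
  unfold Spec_get_password
  by_cases hw : win < 2
  · unfold get_password get_password_alt
    rw [if_pos hw, PySem.List.pyRange_one_eq_nil (by omega)]
    simp
  · unfold get_password get_password_alt
    rw [if_neg hw]
    apply String.toList_inj.mp
    rw [outerA_toList]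
    simp only []
    rw [outerB_toList, join_empty_toList]
    simp only [List.nil_append, List.map_flatten, List.map_map, List.flatten_flatten]
    rw [show ("".toList) = ([] : List Char) from rfl, List.nil_append]
    congr 1
    apply List.map_congr_left
    intro i hi
    rw [PySem.List.mem_pyRange_one] at hi
    simp only [Function.comp]
    rw [core_strings win i (by omega) (by omega) (by omega), List.map_map]
    congr 1
    apply List.map_congr_left
    intro s _
    simp [pvPiece]
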